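-- pv_equiv track=rewrite | github.com/minminlittleshrimp/helix | error_correction.py | extract_error_correction_info
-- ===== SOURCE A (Python) =====
-- from typing import List, Optional, Tuple
--
-- def extract_error_correction_info(suffix: List[int]) -> Tuple[int, int]:
--     """
--     Extract syndrome and checksum from error correction suffix.
--
--     Args:
--         suffix: Error correction suffix
--
--     Returns:
--         Tuple of (syndrome, checksum)
--     """
--     # Extract every other symbol (the original values)
--     original = [suffix[i] for i in range(0, len(suffix), 2)]
--
--     # Last symbol is checksum, rest is syndrome
--     if len(original) < 1:
--         return 0, 0
--
--     checksum = original[-1]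
--     syndrome_quat = original[:-1]
--
--     # Convert syndrome from quaternary to int
--     syndrome = 0
--     for digit in syndrome_quat:
--         syndrome = syndrome * 4 + digit
--
--     return syndrome, checksum
-- ===== SOURCE B (Python) =====
-- from typing import List, Tuple
--
-- def extract_error_correction_info(suffix: List[int]) -> Tuple[int, int]:
--     # Single streaming pass over the even indices: no intermediate list.
--     syndrome = 0
--     prev = 0
--     seen = False
--     for i in range(0, len(suffix), 2):
--         x = suffix[i]
--         if seen:
--             syndrome = syndrome * 4 + prev
--         prev = x
--         seen = True
--     if not seen:
--         return 0, 0
--     return syndrome, prev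
-- ===== Notes on version B (the rewrite author's own statement) =====
-- stated objective: simpler
-- what changed: B replaces A's three phases (build the even-index list, slice off its last element, Horner-fold the rest) by a single streaming pass keeping only the running syndrome and the last-seen even-index value, so no intermediate list is built.
import Mathlib
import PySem

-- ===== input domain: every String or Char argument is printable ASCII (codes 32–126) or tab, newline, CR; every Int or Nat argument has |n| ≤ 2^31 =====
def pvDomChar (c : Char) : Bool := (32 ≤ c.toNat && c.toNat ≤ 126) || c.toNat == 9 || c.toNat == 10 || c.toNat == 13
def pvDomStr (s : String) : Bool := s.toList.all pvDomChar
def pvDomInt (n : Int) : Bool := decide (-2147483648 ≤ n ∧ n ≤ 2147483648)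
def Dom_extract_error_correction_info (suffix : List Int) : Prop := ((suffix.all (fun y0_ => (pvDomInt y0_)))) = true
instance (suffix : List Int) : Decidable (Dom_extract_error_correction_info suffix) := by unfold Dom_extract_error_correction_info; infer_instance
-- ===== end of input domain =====

-- B merges A's list-building, slicing and Horner passes into one streaming fold (simpler, no intermediate list).


-- ===== PORT A =====
-- literal port: build 'original' from every other symbol, then slice and Horner-fold
def extract_error_correction_info (suffix : List Int) : Int × Int :=
  let original := (PySem.List.pyRange 0 suffix.length 2).map
    (fun i => PySem.List.pyGetD suffix i 0)   -- i is always a valid index (0 ≤ i < len), so the default is never used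
  if original.length < 1 then (0, 0)
  else
    let checksum := PySem.List.pyGetD original (-1) 0
    let syndrome_quat := PySem.List.slice original none (some (-1))
    let syndrome := syndrome_quat.foldl (fun s d => s * 4 + d) 0
    (syndrome, checksum)

-- ===== PORT B =====
-- literal port of Source B: one fold over the even indices with state (syndrome, prev, seen)
def extract_error_correction_info_alt (suffix : List Int) : Int × Int :=
  let st := (PySem.List.pyRange 0 suffix.length 2).foldl
    (fun (st : Int × Int × Bool) i =>
      let x := PySem.List.pyGetD suffix i 0   -- i is always a valid index here too
      ((if st.2.2 then st.1 * 4 + st.2.1 else st.1), x, true))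
    (0, 0, false)
  if st.2.2 = false then (0, 0) else (st.1, st.2.1)

-- ===== PRECONDITION & SPEC =====
def Spec_extract_error_correction_info (suffix : List Int) (out : Int × Int) : Prop := out = extract_error_correction_info_alt suffix
instance (suffix : List Int) (out : Int × Int) : Decidable (Spec_extract_error_correction_info suffix out) := by unfold Spec_extract_error_correction_info; infer_instance

-- ===== CLAIM (what is proved, stated in full; the proofs are below) =====
def Claim_equal_extract_error_correction_info : Prop := ∀ (suffix : List Int), Dom_extract_error_correction_info suffix → Spec_extract_error_correction_info suffix (extract_error_correction_info suffix)

-- ===== LEMMAS AND PROOFS =====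

-- B's streaming step, as applied to the values of the even-index list
def pvStep (st : Int × Int × Bool) (x : Int) : Int × Int × Bool :=
  ((if st.2.2 then st.1 * 4 + st.2.1 else st.1), x, true)

-- invariant of B's loop once an element has been seen
theorem pvStep_foldl_seen (ys : List Int) : ∀ (s p : Int),
    ys.foldl pvStep (s, p, true)
      = ((p :: ys).dropLast.foldl (fun a d => a * 4 + d) s,
         (p :: ys).getLast (List.cons_ne_nil _ _), true) := by
  induction ys with
  | nil => intro s p; simp
  | cons y t ih =>
      intro s p
      simp only [List.foldl_cons, pvStep, ih]
      cases t <;> simp [List.getLast]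

-- B's loop over any nonempty value list produces A's (syndrome, checksum)
theorem pvStep_foldl_main (x : Int) (t : List Int) :
    (x :: t).foldl pvStep (0, 0, false)
      = ((x :: t).dropLast.foldl (fun a d => a * 4 + d) 0,
         (x :: t).getLast (List.cons_ne_nil _ _), true) := by
  simp only [List.foldl_cons]
  have : pvStep (0, 0, false) x = (0, x, true) := by simp [pvStep]
  rw [this, pvStep_foldl_seen]

-- ===== VERDICT (by name: the statement is the Claim_ definition above) =====
theorem extract_error_correction_info_spec : Claim_equal_extract_error_correction_info := by
  intro suffix _
  unfold Spec_extract_error_correction_info extract_error_correction_info extract_error_correction_info_alt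
  have hfold : ∀ (init : Int × Int × Bool),
      (PySem.List.pyRange 0 suffix.length 2).foldl
        (fun (st : Int × Int × Bool) i => pvStep st (PySem.List.pyGetD suffix i 0)) init
        = ((PySem.List.pyRange 0 suffix.length 2).map
            (fun i => PySem.List.pyGetD suffix i 0)).foldl pvStep init := by
    intro init; rw [List.foldl_map]
  simp only [pvStep] at hfold
  rw [hfold]
  cases h : (PySem.List.pyRange 0 suffix.length 2).map (fun i => PySem.List.pyGetD suffix i 0) with
  | nil => simp
  | cons x t =>
      rw [pvStep_foldl_main]
      simp [PySem.List.slice_to_neg_one, PySem.List.pyGetD_neg_one]
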